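-- pv_equiv track=rewrite | github.com/Shunderpooch/AdventOfCode2016 | Day  2/bathroom_security_1.py | build_keypad
-- ===== SOURCE A (Python) =====
-- def build_keypad(length, width):
--     total_keypad = []
--     keypad_counter = 1
--     for i in range(0, length): # This is how tall it is (|)
--         keypad_line = []
--         for j in range (0, width): # This is how wide it is (--)
--             keypad_line.append(keypad_counter + j)
--         keypad_counter += width
--         total_keypad.append(keypad_line)
--     return total_keypad
-- ===== SOURCE B (Python) =====
-- def build_keypad(length, width):
--     flat = range(1, length * width + 1)
--     return [list(flat[i * width:(i + 1) * width]) for i in range(length)]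
-- ===== Notes on version B (the rewrite author's own statement) =====
-- stated objective: alternative
-- what changed: Replaces A's nested append loops with a running counter by generating the whole number sequence flat once and reshaping it into rows with slices.
import Mathlib
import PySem

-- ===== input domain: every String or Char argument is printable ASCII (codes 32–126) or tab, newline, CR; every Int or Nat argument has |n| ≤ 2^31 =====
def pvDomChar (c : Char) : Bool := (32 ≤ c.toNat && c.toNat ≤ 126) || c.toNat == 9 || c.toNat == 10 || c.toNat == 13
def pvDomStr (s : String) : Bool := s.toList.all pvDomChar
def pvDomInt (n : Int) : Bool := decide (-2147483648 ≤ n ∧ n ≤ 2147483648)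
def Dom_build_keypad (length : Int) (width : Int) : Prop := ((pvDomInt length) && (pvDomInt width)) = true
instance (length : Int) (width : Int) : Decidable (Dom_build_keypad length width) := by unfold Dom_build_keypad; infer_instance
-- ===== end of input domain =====

-- B builds the flat sequence 1..length*width once and reshapes it into rows by slicing (alternative decomposition; same cost).

-- ===== PORT A =====
-- nested loops with a running counter, appending one element / one row at a time
def build_keypad (length : Int) (width : Int) : List (List Int) :=
  ((PySem.List.pyRange 0 length 1).foldl
      (fun (st : List (List Int) × Int) _i =>
        (st.1 ++ [(PySem.List.pyRange 0 width 1).foldl (fun line j => line ++ [st.2 + j]) []],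
         st.2 + width))
      ([], 1)).1

-- ===== PORT B =====
-- flat = range(1, length*width+1) (here its list of values); rows are the slices flat[i*width:(i+1)*width]
def build_keypad_alt (length : Int) (width : Int) : List (List Int) :=
  (PySem.List.pyRange 0 length 1).map
    (fun i => PySem.List.slice (PySem.List.pyRange 1 (length * width + 1) 1)
      (some (i * width)) (some ((i + 1) * width)))

-- ===== PRECONDITION & SPEC =====
def Spec_build_keypad (length : Int) (width : Int) (out : List (List Int)) : Prop := out = build_keypad_alt length width
instance (length : Int) (width : Int) (out : List (List Int)) : Decidable (Spec_build_keypad length width out) := by unfold Spec_build_keypad; infer_instance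

-- ===== CLAIM (what is proved, stated in full; the proofs are below) =====
def Claim_equal_build_keypad : Prop := ∀ (length : Int) (width : Int), Dom_build_keypad length width → Spec_build_keypad length width (build_keypad length width)

-- ===== LEMMAS AND PROOFS =====

-- A's outer loop, generalized: the body ignores the loop variable, so the result
-- depends only on the list's length; row contents come from the running counter.
theorem pv_A_loop (r : Int → List Int) (W : Int) :
    ∀ (xs : List Int) (acc : List (List Int)) (c : Int),
      xs.foldl (fun (st : List (List Int) × Int) _i => (st.1 ++ [r st.2], st.2 + W)) (acc, c)
        = (acc ++ (List.range xs.length).map (fun i : Nat => r (c + (i : Int) * W)),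
           c + (xs.length : Int) * W) := by
  intro xs
  induction xs with
  | nil => intro acc c; simp
  | cons x xs ih =>
    intro acc c
    simp only [List.foldl_cons, ih, List.length_cons, List.range_succ_eq_map, List.map_cons,
      List.map_map, List.append_assoc, Nat.cast_zero, zero_mul, add_zero, List.singleton_append]
    refine congrArg₂ Prod.mk ?_ (by push_cast; ring)
    congr 1
    congr 1
    apply List.map_congr_left
    intro i _
    exact congrArg r (by push_cast; ring)

-- slicing the empty list gives the empty list
theorem pv_slice_nil (a? b? : Option Int) : PySem.List.slice ([] : List Int) a? b? = [] := by
  rw [List.eq_nil_iff_forall_not_mem]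
  intro x hx
  have := PySem.List.mem_of_mem_slice ([] : List Int) a? b? hx
  simp at this

-- dropping k elements from a unit-step range advances its start by k
theorem pv_pyRange_drop (k : Nat) : ∀ (a b : Int),
    (PySem.List.pyRange a b 1).drop k = PySem.List.pyRange (a + (k : Int)) b 1 := by
  induction k with
  | zero => intro a b; simp
  | succ k ih =>
    intro a b
    by_cases h : b ≤ a
    · rw [PySem.List.pyRange_one_eq_nil h, PySem.List.pyRange_one_eq_nil (by omega)]
      simp
    · rw [PySem.List.pyRange_one_cons (by omega)]
      show (PySem.List.pyRange (a + 1) b 1).drop k = _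
      rw [ih]
      congr 1
      push_cast; ring

-- taking k elements of a unit-step range that contains them truncates its end
theorem pv_pyRange_take (a b : Int) (k : Nat) (h : a + (k : Int) ≤ b) :
    (PySem.List.pyRange a b 1).take k = PySem.List.pyRange a (a + (k : Int)) 1 := by
  rw [PySem.List.pyRange_one_append a (a + (k : Int)) b (by omega) h]
  exact List.take_left' (by rw [PySem.List.length_pyRange_one]; omega)

theorem build_keypad_eq (length width : Int) :
    build_keypad length width = build_keypad_alt length width := by
  unfold build_keypad build_keypad_alt
  rw [pv_A_loop (fun c => (PySem.List.pyRange 0 width 1).foldl (fun line j => line ++ [c + j]) []) width]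
  simp only [List.nil_append, PySem.List.length_pyRange_one, Int.sub_zero]
  rw [PySem.List.pyRange_one 0 length, List.map_map]
  simp only [Int.sub_zero]
  apply List.map_congr_left
  intro i hi
  rw [List.mem_range] at hi
  simp only [Function.comp_apply, zero_add]
  by_cases hw : width ≤ 0
  · -- width ≤ 0 : the row is empty on both sides
    have hfl : length * width + 1 ≤ 1 := by
      have hL : (1 : Int) ≤ length := by omega
      nlinarith
    rw [PySem.List.pyRange_one_eq_nil hw, PySem.List.pyRange_one_eq_nil hfl, pv_slice_nil]
    simp
  · -- width > 0 : the slice is exactly the range [1 + i*width, 1 + (i+1)*width)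
    push Not at hw
    have h0a : (0 : Int) ≤ (i : Int) * width := by positivity
    have hexp : ((i : Int) + 1) * width = (i : Int) * width + width := by ring
    have h0b : (0 : Int) ≤ ((i : Int) + 1) * width := by rw [hexp]; omega
    rw [PySem.List.slice_toNat _ h0a h0b, hexp]
    have hsub : ((i : Int) * width + width).toNat - ((i : Int) * width).toNat = width.toNat := by
      omega
    rw [hsub, pv_pyRange_drop]
    have ha : ((((i : Int) * width).toNat : Int)) = (i : Int) * width := Int.toNat_of_nonneg h0a
    have hwn : ((width.toNat : Int)) = width := Int.toNat_of_nonneg (le_of_lt hw)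
    have hi' : (i : Int) + 1 ≤ length := by omega
    have hbound : 1 + ((((i : Int) * width).toNat : Int)) + (width.toNat : Int)
        ≤ length * width + 1 := by
      rw [ha, hwn]
      nlinarith
    rw [pv_pyRange_take _ _ _ hbound, ha, hwn]
    rw [PySem.List.pyRange_one 0 width, PySem.List.pyRange_one (1 + (i : Int) * width)]
    have hlen : (1 + (i : Int) * width + width - (1 + (i : Int) * width)).toNat
        = (width - 0).toNat := by omega
    rw [hlen]
    rw [List.foldl_map]
    rw [PySem.List.foldl_append_singleton_eq_map]
    apply List.map_congr_left
    intro j _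
    ring

-- ===== VERDICT (by name: the statement is the Claim_ definition above) =====
theorem build_keypad_spec : Claim_equal_build_keypad := by
  intro length width _
  unfold Spec_build_keypad
  exact build_keypad_eq length width
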